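-- pv_equiv track=rewrite | github.com/penarbed29/video_renamer | build/lib/video_renamer/main.py | resolution_label
-- ===== SOURCE A (Python) =====
-- def resolution_label(width, height):
--     resolutions = {
--         4320: '8K',
--         2880: '5_3K',
--         2160: '4K',
--         1440: '2_5K',
--         1080: 'FullHD',
--         720: 'HD',
--         480: 'SD'
--     }
--     vertical = min(width, height)
--     chosen_res = None
--     for res in sorted(resolutions.keys(), reverse=True):
--         if vertical >= res:
--             chosen_res = resolutions[res]
--             break
--     if chosen_res is None:
--         chosen_res = f'Unknown({width}x{height})'
--     return chosen_res
-- ===== SOURCE B (Python) =====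
-- import bisect
--
-- _THRESHOLDS = [480, 720, 1080, 1440, 2160, 2880, 4320]
-- _LABELS = ['SD', 'HD', 'FullHD', '2_5K', '4K', '5_3K', '8K']
--
--
-- def resolution_label(width, height):
--     vertical = min(width, height)
--     idx = bisect.bisect_right(_THRESHOLDS, vertical) - 1
--     if idx < 0:
--         return f'Unknown({width}x{height})'
--     return _LABELS[idx]
-- ===== Notes on version B (the rewrite author's own statement) =====
-- stated objective: idiomatic
-- what changed: Replaces the dict plus descending linear scan with two precomputed ascending parallel lists and a bisect_right binary search that picks the label index directly.
import Mathlib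
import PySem

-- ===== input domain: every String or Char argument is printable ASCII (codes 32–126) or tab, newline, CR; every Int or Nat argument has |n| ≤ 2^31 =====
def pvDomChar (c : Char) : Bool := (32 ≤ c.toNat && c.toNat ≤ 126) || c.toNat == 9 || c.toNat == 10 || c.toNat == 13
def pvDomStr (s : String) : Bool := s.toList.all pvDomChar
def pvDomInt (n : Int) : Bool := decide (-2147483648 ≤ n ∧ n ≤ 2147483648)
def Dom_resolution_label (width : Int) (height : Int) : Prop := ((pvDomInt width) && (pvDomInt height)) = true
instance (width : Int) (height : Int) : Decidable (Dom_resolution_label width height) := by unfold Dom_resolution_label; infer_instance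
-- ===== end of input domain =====

-- B replaces A's dict + descending linear scan with parallel ascending lists and bisect_right (idiomatic).

-- ===== PORT A =====
-- the loop 'for res in sorted(keys, reverse=True): if vertical >= res: chosen = resolutions[res]; break'
def pvLoopA (resolutions : PySem.Dict Int String) (vertical : Int) : List Int → Option String
  | [] => none
  | res :: rest =>
      if vertical ≥ res then some ((resolutions.get? res).getD "")
      else pvLoopA resolutions vertical rest

def resolution_label (width : Int) (height : Int) : String :=
  let resolutions : PySem.Dict Int String :=
    PySem.Dict.ofList [(4320, "8K"), (2880, "5_3K"), (2160, "4K"), (1440, "2_5K"),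
                       (1080, "FullHD"), (720, "HD"), (480, "SD")]
  let vertical := min width height
  let chosen := pvLoopA resolutions vertical (PySem.List.sorted resolutions.keys (fun x => x) true)
  match chosen with
  | some s => s
  | none => "Unknown(" ++ PySem.Int.toStr width ++ "x" ++ PySem.Int.toStr height ++ ")"

-- ===== PORT B =====
def pvThresholds : List Int := [480, 720, 1080, 1440, 2160, 2880, 4320]
def pvLabels : List String := ["SD", "HD", "FullHD", "2_5K", "4K", "5_3K", "8K"]

def resolution_label_alt (width : Int) (height : Int) : String :=
  let vertical := min width height
  let idx : Int := (PySem.List.bisectRight pvThresholds vertical : Int) - 1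
  if idx < 0 then "Unknown(" ++ PySem.Int.toStr width ++ "x" ++ PySem.Int.toStr height ++ ")"
  else (PySem.List.pyGet? pvLabels idx).getD ""

-- ===== PRECONDITION & SPEC =====
def Spec_resolution_label (width : Int) (height : Int) (out : String) : Prop := out = resolution_label_alt width height
instance (width : Int) (height : Int) (out : String) : Decidable (Spec_resolution_label width height out) := by unfold Spec_resolution_label; infer_instance

-- ===== CLAIM (what is proved, stated in full; the proofs are below) =====
def Claim_equal_resolution_label : Prop := ∀ (width : Int) (height : Int), Dom_resolution_label width height → Spec_resolution_label width height (resolution_label width height)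

-- ===== LEMMAS AND PROOFS =====

-- both sides as the same nested-if ladder on min width height
def pvLadder (width height : Int) : String :=
  let v := min width height
  if 4320 ≤ v then "8K" else if 2880 ≤ v then "5_3K" else if 2160 ≤ v then "4K"
  else if 1440 ≤ v then "2_5K" else if 1080 ≤ v then "FullHD" else if 720 ≤ v then "HD"
  else if 480 ≤ v then "SD"
  else "Unknown(" ++ PySem.Int.toStr width ++ "x" ++ PySem.Int.toStr height ++ ")"

lemma A_char (width height : Int) : resolution_label width height = pvLadder width height := by
  have hs : PySem.List.sorted (PySem.Dict.ofList [((4320:Int), "8K"), (2880, "5_3K"), (2160, "4K"), (1440, "2_5K"), (1080, "FullHD"), (720, "HD"), (480, "SD")]).keys (fun x => x) true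
      = [4320, 2880, 2160, 1440, 1080, 720, 480] := by decide
  unfold resolution_label pvLadder
  dsimp only
  rw [hs]
  simp only [pvLoopA, ge_iff_le]
  split_ifs <;> simp_all <;> decide

lemma bisect_char (v : Int) :
    (PySem.List.bisectRight pvThresholds v : Int) =
      if 4320 ≤ v then 7 else if 2880 ≤ v then 6 else if 2160 ≤ v then 5
      else if 1440 ≤ v then 4 else if 1080 ≤ v then 3 else if 720 ≤ v then 2
      else if 480 ≤ v then 1 else 0 := by
  obtain ⟨hlen, hlt, hge⟩ := PySem.List.bisectRight_spec pvThresholds v (by decide)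
  have l0 : 0 < PySem.List.bisectRight pvThresholds v → (480:Int) ≤ v := fun h => by simpa [pvThresholds] using hlt 0 (by simp [pvThresholds]) h
  have l1 : 1 < PySem.List.bisectRight pvThresholds v → (720:Int) ≤ v := fun h => by simpa [pvThresholds] using hlt 1 (by simp [pvThresholds]) h
  have l2 : 2 < PySem.List.bisectRight pvThresholds v → (1080:Int) ≤ v := fun h => by simpa [pvThresholds] using hlt 2 (by simp [pvThresholds]) h
  have l3 : 3 < PySem.List.bisectRight pvThresholds v → (1440:Int) ≤ v := fun h => by simpa [pvThresholds] using hlt 3 (by simp [pvThresholds]) h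
  have l4 : 4 < PySem.List.bisectRight pvThresholds v → (2160:Int) ≤ v := fun h => by simpa [pvThresholds] using hlt 4 (by simp [pvThresholds]) h
  have l5 : 5 < PySem.List.bisectRight pvThresholds v → (2880:Int) ≤ v := fun h => by simpa [pvThresholds] using hlt 5 (by simp [pvThresholds]) h
  have l6 : 6 < PySem.List.bisectRight pvThresholds v → (4320:Int) ≤ v := fun h => by simpa [pvThresholds] using hlt 6 (by simp [pvThresholds]) h
  have g0 : PySem.List.bisectRight pvThresholds v ≤ 0 → v < (480:Int) := fun h => by simpa [pvThresholds] using hge 0 (by simp [pvThresholds]) h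
  have g1 : PySem.List.bisectRight pvThresholds v ≤ 1 → v < (720:Int) := fun h => by simpa [pvThresholds] using hge 1 (by simp [pvThresholds]) h
  have g2 : PySem.List.bisectRight pvThresholds v ≤ 2 → v < (1080:Int) := fun h => by simpa [pvThresholds] using hge 2 (by simp [pvThresholds]) h
  have g3 : PySem.List.bisectRight pvThresholds v ≤ 3 → v < (1440:Int) := fun h => by simpa [pvThresholds] using hge 3 (by simp [pvThresholds]) h
  have g4 : PySem.List.bisectRight pvThresholds v ≤ 4 → v < (2160:Int) := fun h => by simpa [pvThresholds] using hge 4 (by simp [pvThresholds]) h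
  have g5 : PySem.List.bisectRight pvThresholds v ≤ 5 → v < (2880:Int) := fun h => by simpa [pvThresholds] using hge 5 (by simp [pvThresholds]) h
  have g6 : PySem.List.bisectRight pvThresholds v ≤ 6 → v < (4320:Int) := fun h => by simpa [pvThresholds] using hge 6 (by simp [pvThresholds]) h
  have hn7 : PySem.List.bisectRight pvThresholds v ≤ 7 := by simpa [pvThresholds] using hlen
  generalize hn : PySem.List.bisectRight pvThresholds v = n at l0 l1 l2 l3 l4 l5 l6 g0 g1 g2 g3 g4 g5 g6 hn7 ⊢
  interval_cases n <;> simp_all <;> split_ifs <;> omega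

lemma B_char (width height : Int) : resolution_label_alt width height = pvLadder width height := by
  unfold resolution_label_alt pvLadder
  dsimp only
  rw [bisect_char]
  split_ifs <;> first | rfl | omega

-- ===== VERDICT (by name: the statement is the Claim_ definition above) =====
theorem resolution_label_spec : Claim_equal_resolution_label := by
  intro width height _
  unfold Spec_resolution_label
  rw [A_char, B_char]
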